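-- pv_equiv track=rewrite | github.com/thebertster/aoc_2015 | aoc_2015/day_20.py | GetPresents
-- ===== SOURCE A (Python) =====
-- import math
--
-- def GetPresents(n):
--     v = 0
--     for i in range(1, 1 + math.floor(math.sqrt(n))):
--         d, m = divmod(n, i)
--         if m == 0:
--             if d <= 50: v += 11 * i
--             if i <= 50 and i != d: v+= 11 * d
--     return v
-- ===== SOURCE B (Python) =====
-- def GetPresents(n):
--     # Each elf delivers to at most 50 houses, so a divisor i of n counts
--     # exactly when k = n // i is between 1 and 50; enumerate k instead.
--     v = 0
--     for k in range(1, 51):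
--         if n % k == 0:
--             v += 11 * (n // k)
--     return v
-- ===== Notes on version B (the rewrite author's own statement) =====
-- stated objective: simpler
-- what changed: Instead of enumerating divisor pairs up to sqrt(n), B loops k over 1..50 (the per-elf 50-house cap) and adds 11*(n//k) whenever k divides n, since a divisor i qualifies exactly when n//i is between 1 and 50; the loop becomes constant-bounded.
import Mathlib
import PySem

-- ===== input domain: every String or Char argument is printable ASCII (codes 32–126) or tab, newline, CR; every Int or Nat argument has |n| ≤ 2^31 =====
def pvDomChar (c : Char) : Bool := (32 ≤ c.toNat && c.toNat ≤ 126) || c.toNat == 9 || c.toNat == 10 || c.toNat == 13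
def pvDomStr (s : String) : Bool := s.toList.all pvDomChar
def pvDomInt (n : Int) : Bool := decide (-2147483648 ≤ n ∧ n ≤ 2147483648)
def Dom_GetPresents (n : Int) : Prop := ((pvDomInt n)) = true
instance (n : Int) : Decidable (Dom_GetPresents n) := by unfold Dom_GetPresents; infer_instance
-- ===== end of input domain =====

-- B replaces A's divisor-pair scan up to sqrt(n) by a constant loop over the
-- elf index k = 1..50 (the 50-house delivery cap), adding 11*(n//k) when k divides n.
-- Return-value equivalence is proved for all n ≥ 0 (A raises ValueError for n < 0).

-- ===== PORT A =====
-- math.floor(math.sqrt(n)) is ported as Nat.sqrt n.toNat: exact on Dom ∩ Pre_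
-- (0 ≤ n ≤ 2^31 < 2^52, where math.sqrt is accurate enough that its floor is the
-- integer square root); for n < 0 math.sqrt raises ValueError, excluded by Pre_.
def GetPresents (n : Int) : Int :=
  (PySem.List.pyRange 1 (1 + (Nat.sqrt n.toNat : Int)) 1).foldl (fun v i =>
    let d := PySem.Int.floordiv n i
    let m := PySem.Int.mod n i
    if m = 0 then
      let v' := if d ≤ 50 then v + 11 * i else v
      if i ≤ 50 ∧ i ≠ d then v' + 11 * d else v'
    else v) 0

-- ===== PORT B =====
def GetPresents_alt (n : Int) : Int :=
  (PySem.List.pyRange 1 51 1).foldl (fun v k =>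
    if PySem.Int.mod n k = 0 then v + 11 * PySem.Int.floordiv n k else v) 0

-- ===== PRECONDITION & SPEC =====
-- Pre_ excludes exactly n < 0, where A raises ValueError via math.sqrt.
def Pre_GetPresents (n : Int) : Prop := 0 ≤ n
instance (n : Int) : Decidable (Pre_GetPresents n) := by unfold Pre_GetPresents; infer_instance
def pvWitness_GetPresents : Int := (6)

def Spec_GetPresents (n : Int) (out : Int) : Prop := out = GetPresents_alt n
instance (n : Int) (out : Int) : Decidable (Spec_GetPresents n out) := by unfold Spec_GetPresents; infer_instance

-- ===== CLAIM (what is proved, stated in full; the proofs are below) =====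
def Claim_equal_GetPresents : Prop := ∀ (n : Int), Dom_GetPresents n → Pre_GetPresents n → Spec_GetPresents n (GetPresents n)

-- ===== LEMMAS AND PROOFS =====

-- A's loop as a sum over its range
theorem GetPresents_fold_eq (n : Int) :
    GetPresents n = ((PySem.List.pyRange 1 (1 + (Nat.sqrt n.toNat : Int)) 1).map
      (fun i => if PySem.Int.mod n i = 0 then
          ((if PySem.Int.floordiv n i ≤ 50 then 11 * i else 0) +
           (if i ≤ 50 ∧ i ≠ PySem.Int.floordiv n i then 11 * PySem.Int.floordiv n i else 0))
        else 0)).sum := by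
  unfold GetPresents
  rw [show (fun (v i : Int) =>
      let d := PySem.Int.floordiv n i
      let m := PySem.Int.mod n i
      if m = 0 then
        let v' := if d ≤ 50 then v + 11 * i else v
        if i ≤ 50 ∧ i ≠ d then v' + 11 * d else v'
      else v) = (fun v i => v + (if PySem.Int.mod n i = 0 then
          ((if PySem.Int.floordiv n i ≤ 50 then 11 * i else 0) +
           (if i ≤ 50 ∧ i ≠ PySem.Int.floordiv n i then 11 * PySem.Int.floordiv n i else 0))
        else 0)) from by funext v i; simp only []; split_ifs <;> ring]
  rw [PySem.List.foldl_add]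
  simp

-- B's loop as a sum over its range
theorem GetPresents_alt_fold_eq (n : Int) :
    GetPresents_alt n = ((PySem.List.pyRange 1 51 1).map
      (fun k => if PySem.Int.mod n k = 0 then 11 * PySem.Int.floordiv n k else 0)).sum := by
  unfold GetPresents_alt
  rw [show (fun (v k : Int) => if PySem.Int.mod n k = 0 then v + 11 * PySem.Int.floordiv n k else v)
      = (fun v k => v + (if PySem.Int.mod n k = 0 then 11 * PySem.Int.floordiv n k else 0)) from by
    funext v k; split_ifs <;> ring]
  rw [PySem.List.foldl_add]
  simp

theorem list_sum_range (t : ℕ) (f : ℕ → ℤ) :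
    ((List.range t).map f).sum = ∑ i ∈ Finset.range t, f i := by
  induction t with
  | zero => simp
  | succ k ih => simp [List.range_succ, Finset.sum_range_succ, ih]

theorem sum_range_shift (t : ℕ) (f : ℕ → ℤ) :
    ∑ j ∈ Finset.range t, f (j+1) = ∑ i ∈ Finset.Icc 1 t, f i := by
  induction t with
  | zero => simp
  | succ k ih => rw [Finset.sum_range_succ, Finset.sum_Icc_succ_top (by omega), ih]

theorem icc_filter_divisors (m t : ℕ) (hm : m ≠ 0) :
    (Finset.Icc 1 t).filter (fun i => m % i = 0) = m.divisors.filter (· ≤ t) := by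
  ext i
  simp only [Finset.mem_filter, Finset.mem_Icc, Nat.mem_divisors]
  constructor
  · rintro ⟨⟨h1, h2⟩, h3⟩
    exact ⟨⟨Nat.dvd_of_mod_eq_zero h3, hm⟩, h2⟩
  · rintro ⟨⟨h1, _⟩, h2⟩
    have hpos : 0 < i := Nat.pos_of_dvd_of_pos h1 (Nat.pos_of_ne_zero hm)
    exact ⟨⟨hpos, h2⟩, Nat.mod_eq_zero_of_dvd h1⟩

-- a qualifying cofactor m/d lies below the sqrt exactly when the divisor d lies above it
theorem sqrt_cofactor_iff (m d : ℕ) (hm : m ≠ 0) (hd : d ∣ m) :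
    (m / d ≤ m.sqrt ∧ m / d ≠ d) ↔ m.sqrt < d := by
  have hde : d * (m / d) = m := Nat.mul_div_cancel' hd
  have hd0 : 0 < d := Nat.pos_of_ne_zero (by rintro rfl; simp at hde; omega)
  have he0 : 0 < m / d := Nat.pos_of_ne_zero (by intro h; rw [h] at hde; simp at hde; omega)
  have h1 : m.sqrt * m.sqrt ≤ m := Nat.sqrt_le m
  have h2 : m < (m.sqrt + 1) * (m.sqrt + 1) := Nat.lt_succ_sqrt m
  constructor
  · rintro ⟨hle, hne⟩
    by_contra hcon
    have h : d ≤ m.sqrt := by omega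
    have : d = m.sqrt ∧ m / d = m.sqrt := by constructor <;> nlinarith
    omega
  · intro h
    have hle : m / d ≤ m.sqrt := by nlinarith [Nat.div_mul_le_self m d]
    exact ⟨hle, by omega⟩

-- the central combinatorial identity, in ℕ
theorem main_sum_eq (m : ℕ) :
    (∑ j ∈ Finset.range (Nat.sqrt m),
      (if m % (j+1) = 0 then
        ((if m / (j+1) ≤ 50 then 11 * ((j+1:ℕ) : ℤ) else 0) +
         (if (j+1) ≤ 50 ∧ (j+1) ≠ m / (j+1) then 11 * ((m / (j+1) : ℕ) : ℤ) else 0))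
       else 0)) =
    (∑ j ∈ Finset.range 50,
      (if m % (j+1) = 0 then 11 * ((m / (j+1) : ℕ) : ℤ) else 0)) := by
  by_cases hm : m = 0
  · subst hm; simp
  refine Eq.trans (sum_range_shift (Nat.sqrt m) (fun i => if m % i = 0 then
      ((if m / i ≤ 50 then 11 * (i : ℤ) else 0) +
       (if i ≤ 50 ∧ i ≠ m / i then 11 * ((m / i : ℕ) : ℤ) else 0)) else 0))
    (Eq.trans ?_ (sum_range_shift 50 (fun i => if m % i = 0 then 11 * ((m / i : ℕ) : ℤ) else 0)).symm)
  rw [show (∑ i ∈ Finset.Icc 1 (Nat.sqrt m),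
        (if m % i = 0 then
          ((if m / i ≤ 50 then 11 * (i : ℤ) else 0) +
           (if i ≤ 50 ∧ i ≠ m / i then 11 * ((m / i : ℕ) : ℤ) else 0))
         else 0)) =
      ∑ i ∈ (Finset.Icc 1 (Nat.sqrt m)).filter (fun i => m % i = 0),
        ((if m / i ≤ 50 then 11 * (i : ℤ) else 0) +
         (if i ≤ 50 ∧ i ≠ m / i then 11 * ((m / i : ℕ) : ℤ) else 0)) from
    (Finset.sum_filter _ _).symm]
  rw [show (∑ i ∈ Finset.Icc 1 50, (if m % i = 0 then 11 * ((m / i : ℕ) : ℤ) else 0)) =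
      ∑ i ∈ (Finset.Icc 1 50).filter (fun i => m % i = 0), 11 * ((m / i : ℕ) : ℤ) from
    (Finset.sum_filter _ _).symm]
  rw [icc_filter_divisors m _ hm, icc_filter_divisors m _ hm]
  rw [Finset.sum_filter, Finset.sum_filter]
  -- LHS: split into the below-sqrt contribution and the (reflected) above-sqrt contribution
  have hsplit : (∑ i ∈ m.divisors,
        (if i ≤ Nat.sqrt m then
          ((if m / i ≤ 50 then 11 * (i : ℤ) else 0) +
           (if i ≤ 50 ∧ i ≠ m / i then 11 * ((m / i : ℕ) : ℤ) else 0)) else 0)) =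
      (∑ i ∈ m.divisors, (if i ≤ Nat.sqrt m ∧ m / i ≤ 50 then 11 * (i : ℤ) else 0)) +
      (∑ i ∈ m.divisors,
        (if m / i ≤ Nat.sqrt m ∧ m / i ≤ 50 ∧ m / i ≠ i then 11 * (i : ℤ) else 0)) := by
    have hrefl2 := Nat.sum_div_divisors (α := ℤ) m
      (fun i => if i ≤ Nat.sqrt m ∧ i ≤ 50 ∧ i ≠ m / i then 11 * ((m / i : ℕ) : ℤ) else 0)
    have e1 : (∑ i ∈ m.divisors,
        (if m / i ≤ Nat.sqrt m ∧ m / i ≤ 50 ∧ m / i ≠ i then 11 * (i : ℤ) else 0)) =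
        ∑ d ∈ m.divisors, (if m / d ≤ Nat.sqrt m ∧ m / d ≤ 50 ∧ m / d ≠ m / (m / d)
          then 11 * ((m / (m / d) : ℕ) : ℤ) else 0) := by
      apply Finset.sum_congr rfl
      intro d hd
      obtain ⟨hdvd, -⟩ := Nat.mem_divisors.mp hd
      simp only [Nat.div_div_self hdvd hm]
    rw [e1, hrefl2, ← Finset.sum_add_distrib]
    apply Finset.sum_congr rfl
    intro d hd
    obtain ⟨hdvd, -⟩ := Nat.mem_divisors.mp hd
    by_cases h1 : d ≤ Nat.sqrt m
    · rw [if_pos h1]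
      by_cases h2 : m / d ≤ 50 <;> by_cases h3 : d ≤ 50 ∧ d ≠ m / d <;>
        simp [h1, h2, h3]
    · rw [if_neg h1, if_neg (fun hh => h1 hh.1), if_neg (fun hh => h1 hh.1), add_zero]
  rw [hsplit, ← Finset.sum_add_distrib]
  -- RHS: reflect k ↦ m / k, then compare element by element
  have hrefl := Nat.sum_div_divisors (α := ℤ) m
    (fun i => if i ≤ 50 then 11 * ((m / i : ℕ) : ℤ) else 0)
  rw [← hrefl]
  apply Finset.sum_congr rfl
  intro d hd
  obtain ⟨hdvd, -⟩ := Nat.mem_divisors.mp hd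
  have hdds : m / (m / d) = d := Nat.div_div_self hdvd hm
  simp only [hdds]
  rcases Nat.lt_or_ge (Nat.sqrt m) d with h | h
  · have hc := (sqrt_cofactor_iff m d hm hdvd).mpr h
    rw [if_neg (fun hh : _ ∧ _ => absurd hh.1 (by omega))]
    by_cases h50 : m / d ≤ 50
    · rw [if_pos ⟨hc.1, h50, hc.2⟩, if_pos h50]; ring
    · rw [if_neg (fun hh : _ ∧ _ ∧ _ => h50 hh.2.1), if_neg h50]; ring
  · have hc : ¬(m / d ≤ Nat.sqrt m ∧ m / d ≠ d) := fun hcc =>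
      absurd ((sqrt_cofactor_iff m d hm hdvd).mp hcc) (by omega)
    rw [if_neg (fun hh : _ ∧ _ ∧ _ => hc ⟨hh.1, hh.2.2⟩)]
    by_cases h50 : m / d ≤ 50
    · rw [if_pos ⟨h, h50⟩, if_pos h50]; ring
    · rw [if_neg (fun hh : _ ∧ _ => h50 hh.2), if_neg h50]; ring

-- ===== VERDICT (by name: the statement is the Claim_ definition above) =====
theorem GetPresents_spec : Claim_equal_GetPresents := by
  intro n _ hpre
  unfold Spec_GetPresents
  lift n to ℕ using hpre with m
  rw [GetPresents_fold_eq, GetPresents_alt_fold_eq]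
  rw [PySem.List.pyRange_one, PySem.List.pyRange_one]
  simp only [List.map_map]
  rw [list_sum_range, list_sum_range]
  have h1 : ((1 + (Nat.sqrt (Int.toNat (m:Int)) : Int)) - 1).toNat = Nat.sqrt m := by simp
  have h2 : ((51 : Int) - 1).toNat = 50 := by decide
  rw [h1, h2]
  have := main_sum_eq m
  refine Eq.trans ?_ (Eq.trans this ?_)
  · apply Finset.sum_congr rfl
    intro j _
    simp only [Function.comp]
    have hcast : (1 : ℤ) + (j : ℤ) = ((j + 1 : ℕ) : ℤ) := by push_cast; ring
    rw [hcast, PySem.Int.mod_natCast, PySem.Int.floordiv_natCast]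
    norm_cast
  · apply Finset.sum_congr rfl
    intro j _
    simp only [Function.comp]
    have hcast : (1 : ℤ) + (j : ℤ) = ((j + 1 : ℕ) : ℤ) := by push_cast; ring
    rw [hcast, PySem.Int.mod_natCast, PySem.Int.floordiv_natCast]
    norm_cast
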